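-- pv_equiv track=rewrite | github.com/facup94/EulerProjectPython | Scripts/54.py | x_of_a_kind
-- ===== SOURCE A (Python) =====
-- def x_of_a_kind(cards, x):
--     values_set = list(set(cards))
--     for valueS in values_set:
--         count = 0
--         for value in cards:
--             if valueS == value: count += 1
--         if count == x: return True
--     return False
-- ===== SOURCE B (Python) =====
-- def x_of_a_kind(cards, x):
--     s = sorted(cards)
--     if not s:
--         return False
--     run = 1
--     for i in range(1, len(s)):
--         if s[i] == s[i - 1]:
--             run += 1
--         else:
--             if run == x:
--                 return True
--             run = 1
--     return run == x
-- ===== Notes on version B (the rewrite author's own statement) =====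
-- stated objective: faster
-- what changed: Replaced the per-distinct-value full rescans of the list with a sort of a copy followed by a single pass comparing each run length of equal consecutive elements against x.
import Mathlib
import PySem

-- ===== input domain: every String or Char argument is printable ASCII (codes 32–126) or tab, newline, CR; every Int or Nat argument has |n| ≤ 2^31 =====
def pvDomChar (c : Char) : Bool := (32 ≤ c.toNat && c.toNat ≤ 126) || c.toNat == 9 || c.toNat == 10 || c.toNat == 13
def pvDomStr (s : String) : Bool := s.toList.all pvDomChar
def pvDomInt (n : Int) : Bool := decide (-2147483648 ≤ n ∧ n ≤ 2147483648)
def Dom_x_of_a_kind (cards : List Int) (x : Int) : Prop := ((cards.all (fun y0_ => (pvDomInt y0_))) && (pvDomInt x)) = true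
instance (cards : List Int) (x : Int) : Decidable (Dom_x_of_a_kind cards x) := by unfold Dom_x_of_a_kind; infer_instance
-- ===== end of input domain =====

-- B replaces A's per-distinct-value rescans of the whole list with sort + one run-length pass (faster).

-- ===== PORT A =====
-- inner loop: count = 0; for value in cards: if valueS == value: count += 1
def xoakCount (cards : List Int) (valueS : Int) : Int :=
  cards.foldl (fun count value => if valueS = value then count + 1 else count) 0

-- outer loop over values_set with early return
def xoakGoA (cards : List Int) (x : Int) : List Int → Bool
  | [] => false
  | valueS :: rest =>
    if xoakCount cards valueS = x then true else xoakGoA cards x rest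

def x_of_a_kind (cards : List Int) (x : Int) : Bool :=
  xoakGoA cards x (PySem.Set.ofList cards)

-- ===== PORT B =====
-- loop over the sorted tail, tracking the previous element and the current run length
def xoakGoB (x : Int) : Int → Int → List Int → Bool
  | _prev, run, [] => run = x
  | prev, run, h :: t =>
    if h = prev then xoakGoB x prev (run + 1) t
    else if run = x then true
    else xoakGoB x h 1 t

def x_of_a_kind_alt (cards : List Int) (x : Int) : Bool :=
  match PySem.List.sorted cards (fun v => v) false with
  | [] => false
  | h :: t => xoakGoB x h 1 t

-- ===== PRECONDITION & SPEC =====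
def Spec_x_of_a_kind (cards : List Int) (x : Int) (out : Bool) : Prop := out = x_of_a_kind_alt cards x
instance (cards : List Int) (x : Int) (out : Bool) : Decidable (Spec_x_of_a_kind cards x out) := by unfold Spec_x_of_a_kind; infer_instance

-- ===== CLAIM (what is proved, stated in full; the proofs are below) =====
def Claim_equal_x_of_a_kind : Prop := ∀ (cards : List Int) (x : Int), Dom_x_of_a_kind cards x → Spec_x_of_a_kind cards x (x_of_a_kind cards x)

-- ===== LEMMAS AND PROOFS =====

theorem xoakCount_eq (cards : List Int) (v : Int) :
    xoakCount cards v = (cards.count v : Int) := by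
  unfold xoakCount
  suffices h : ∀ (l : List Int) (n : Int),
      l.foldl (fun count value => if v = value then count + 1 else count) n = n + (l.count v : Int) by
    simpa using h cards 0
  intro l
  induction l with
  | nil => simp
  | cons h t ih =>
    intro n
    by_cases hv : v = h
    · subst hv
      simp [ih]
      ring
    · simp [hv, Ne.symm hv, ih]

theorem xoakGoA_iff (cards : List Int) (x : Int) (vs : List Int) :
    xoakGoA cards x vs = true ↔ ∃ v ∈ vs, (cards.count v : Int) = x := by
  induction vs with
  | nil => simp [xoakGoA]
  | cons h t ih =>
    by_cases hc : xoakCount cards h = x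
    · rw [xoakCount_eq] at hc
      simp [xoakGoA, xoakCount_eq, hc]
    · rw [xoakCount_eq] at hc
      simp [xoakGoA, xoakCount_eq, hc, ih]

theorem xoakGoB_iff (x : Int) :
    ∀ (t : List Int) (prev run : Int), (prev :: t).Pairwise (· ≤ ·) →
      (xoakGoB x prev run t = true ↔
        (run + (t.count prev : Int) = x ∨ ∃ v ∈ t, prev < v ∧ (t.count v : Int) = x)) := by
  intro t
  induction t with
  | nil =>
    intro prev run _
    simp [xoakGoB]
  | cons h t ih =>
    intro prev run hp
    have hph : prev ≤ h := (List.pairwise_cons.1 hp).1 h (by simp)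
    have hpt : (h :: t).Pairwise (· ≤ ·) := (List.pairwise_cons.1 hp).2
    have hall : ∀ y ∈ t, h ≤ y := (List.pairwise_cons.1 hpt).1
    by_cases hhp : h = prev
    · subst hhp
      have hstep : xoakGoB x h run (h :: t) = xoakGoB x h (run + 1) t := by
        simp [xoakGoB]
      rw [hstep, ih h (run + 1) hpt]
      constructor
      · rintro (hc | ⟨v, hv, hlt, hc⟩)
        · left; simp; omega
        · right; exact ⟨v, by simp [hv], hlt, by
            have hvne : v ≠ h := ne_of_gt hlt
            simpa [List.count_cons, Ne.symm hvne] using hc⟩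
      · rintro (hc | ⟨v, hv, hlt, hc⟩)
        · left; simp at hc ⊢; omega
        · have hvne : v ≠ h := ne_of_gt hlt
          have hv' : v ∈ t := by
            rcases List.mem_cons.1 hv with h1 | h1
            · exact absurd h1 hvne
            · exact h1
          right; exact ⟨v, hv', hlt, by simpa [List.count_cons, Ne.symm hvne] using hc⟩
    · have hlt : prev < h := lt_of_le_of_ne hph (fun e => hhp e.symm)
      have hnotin : prev ∉ h :: t := by
        intro hmem
        rcases List.mem_cons.1 hmem with h1 | h1
        · exact hhp h1.symm
        · exact absurd (hall _ h1) (not_le.2 hlt)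
      have hcnt0 : ((h :: t).count prev : Int) = 0 := by
        simp [List.count_eq_zero_of_not_mem hnotin]
      have hstep : xoakGoB x prev run (h :: t) =
          (if run = x then true else xoakGoB x h 1 t) := by
        simp [xoakGoB, hhp]
      rw [hstep]
      by_cases hrx : run = x
      · simp only [if_pos hrx]
        constructor
        · intro _; left; omega
        · intro _; trivial
      · simp only [if_neg hrx]
        rw [ih h 1 hpt]
        constructor
        · rintro (hc | ⟨v, hv, hvlt, hc⟩)
          · right
            refine ⟨h, by simp, hlt, ?_⟩
            simp; omega
          · have hvne : v ≠ h := ne_of_gt hvlt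
            right
            exact ⟨v, by simp [hv], lt_trans hlt hvlt,
              by simpa [List.count_cons, Ne.symm hvne] using hc⟩
        · rintro (hc | ⟨v, hv, hvlt, hc⟩)
          · omega
          · rcases List.mem_cons.1 hv with h1 | h1
            · subst h1
              left
              simp at hc; omega
            · by_cases hvh : v = h
              · subst hvh
                left
                simp at hc; omega
              · right
                exact ⟨v, h1, lt_of_le_of_ne (hall _ h1) (Ne.symm hvh),
                  by simpa [List.count_cons, Ne.symm hvh] using hc⟩

theorem xoak_alt_iff (cards : List Int) (x : Int) :
    x_of_a_kind_alt cards x = true ↔ ∃ v ∈ cards, (cards.count v : Int) = x := by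
  unfold x_of_a_kind_alt
  have hperm : (PySem.List.sorted cards (fun v => v) false).Perm cards :=
    PySem.List.sorted_perm cards (fun v => v) false
  have hpw : (PySem.List.sorted cards (fun v => v) false).Pairwise (· ≤ ·) := by
    simpa using (PySem.List.sorted_pairwise (xs := cards) (key := fun v => v))
  rcases hs : PySem.List.sorted cards (fun v => v) false with _ | ⟨m, t⟩
  · have : cards = [] := by
      have := hperm; rw [hs] at this; exact this.symm.eq_nil
    simp [this]
  · rw [hs] at hperm hpw
    have hcount : ∀ v : Int, (m :: t).count v = cards.count v := fun v => hperm.count_eq v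
    have hmem : ∀ v : Int, v ∈ m :: t ↔ v ∈ cards := fun v => hperm.mem_iff
    have hall : ∀ y ∈ t, m ≤ y := (List.pairwise_cons.1 hpw).1
    rw [xoakGoB_iff x t m 1 hpw]
    constructor
    · rintro (hc | ⟨v, hv, hvlt, hc⟩)
      · refine ⟨m, (hmem m).1 (by simp), ?_⟩
        rw [← hcount m]; simp; omega
      · have hvne : v ≠ m := ne_of_gt hvlt
        refine ⟨v, (hmem v).1 (by simp [hv]), ?_⟩
        rw [← hcount v]; simpa [List.count_cons, Ne.symm hvne]
    · rintro ⟨v, hv, hc⟩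
      rw [← hcount v] at hc
      by_cases hvm : v = m
      · subst hvm
        left
        simp at hc; omega
      · have hvt : v ∈ t := by
          rcases List.mem_cons.1 ((hmem v).2 hv) with h1 | h1
          · exact absurd h1 hvm
          · exact h1
        right
        exact ⟨v, hvt, lt_of_le_of_ne (hall _ hvt) (Ne.symm hvm),
          by simpa [List.count_cons, Ne.symm hvm] using hc⟩

-- ===== VERDICT (by name: the statement is the Claim_ definition above) =====
theorem x_of_a_kind_spec : Claim_equal_x_of_a_kind := by
  intro cards x _
  unfold Spec_x_of_a_kind
  have hA : x_of_a_kind cards x = true ↔ ∃ v ∈ cards, (cards.count v : Int) = x := by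
    unfold x_of_a_kind
    rw [xoakGoA_iff]
    constructor
    · rintro ⟨v, hv, hc⟩; exact ⟨v, (PySem.Set.mem_ofList _ _).1 hv, hc⟩
    · rintro ⟨v, hv, hc⟩; exact ⟨v, (PySem.Set.mem_ofList _ _).2 hv, hc⟩
  have hB := xoak_alt_iff cards x
  by_cases h : ∃ v ∈ cards, (cards.count v : Int) = x
  · rw [hA.2 h, hB.2 h]
  · have ha : x_of_a_kind cards x = false := by
      cases hv : x_of_a_kind cards x
      · rfl
      · exact absurd (hA.1 hv) h
    have hb : x_of_a_kind_alt cards x = false := by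
      cases hv : x_of_a_kind_alt cards x
      · rfl
      · exact absurd (hB.1 hv) h
    rw [ha, hb]
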